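-- pv_equiv track=rewrite | github.com/BhekumusaEric/assessment | solution.py | draw_triangle
-- ===== SOURCE A (Python) =====
-- def draw_triangle(height: int) -> str:
--     """
--     Draw a left-aligned number triangle.
--     Example for height=3:
--     1
--     12
--     123
--     """
--     # TODO: Implement the drawing logic
--     n = []
--     for i in range(1 , height + 1):
--         for j in range(1 , i + 1):
--             n.append(j)
--         if i == height:
--             break
--         n.append("\n")
--     return "".join([str(i) for i in n])
-- ===== SOURCE B (Python) =====
-- def draw_triangle(height: int) -> str:
--     rows = []
--     row = ""
--     for i in range(1, height + 1):
--         row += str(i)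
--         rows.append(row)
--     return "\n".join(rows)
-- ===== Notes on version B (the rewrite author's own statement) =====
-- stated objective: alternative
-- what changed: B is a single pass that reuses the previous row: it extends one running string 'row += str(i)' and collects its snapshots, then joins with '\n', eliminating A's inner 1..i loop, its flat mixed int/newline accumulator list with the 'if i == height: break' guard, and the final per-element str() map.
import Mathlib
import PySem

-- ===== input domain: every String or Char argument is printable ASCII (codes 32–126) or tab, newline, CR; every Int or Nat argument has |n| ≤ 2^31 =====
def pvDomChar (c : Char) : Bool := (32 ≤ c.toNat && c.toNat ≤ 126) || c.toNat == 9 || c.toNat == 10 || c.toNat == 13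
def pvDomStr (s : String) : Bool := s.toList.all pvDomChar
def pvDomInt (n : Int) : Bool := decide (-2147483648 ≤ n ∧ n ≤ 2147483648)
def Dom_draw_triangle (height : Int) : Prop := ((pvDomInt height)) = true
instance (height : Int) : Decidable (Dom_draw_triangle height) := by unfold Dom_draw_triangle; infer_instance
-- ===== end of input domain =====

-- B makes a single pass that reuses the previous row (row += str(i), snapshot it), then joins the
-- snapshots with "\n"; A runs a nested loop into one flat mixed int/newline list with a manual
-- 'if i == height: break' guard. Same output, a different single-pass decomposition.

-- ===== PORT A =====
-- element of A's accumulator list n: an int (from n.append(j)) or the string "\n"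
def pvElemStr : Int ⊕ String → String
  | .inl i => PySem.Int.toStr i
  | .inr s => s

-- the outer 'for i in …' loop with its break, carried state = the list n
def pvLoopA (height : Int) : List Int → List (Int ⊕ String) → List (Int ⊕ String)
  | [], n => n
  | i :: rest, n =>
      let n2 := n ++ (PySem.List.pyRange 1 (i + 1) 1).map Sum.inl
      if i = height then n2 else pvLoopA height rest (n2 ++ [Sum.inr "\n"])

def draw_triangle (height : Int) : String :=
  PySem.Str.join "" ((pvLoopA height (PySem.List.pyRange 1 (height + 1) 1) []).map pvElemStr)

-- ===== PORT B =====
-- the single 'for i in …' loop; state = (running row, list of row snapshots)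
def pvLoopB : List Int → String → List String → String × List String
  | [], row, rows => (row, rows)
  | i :: rest, row, rows =>
      let row2 := row ++ PySem.Int.toStr i
      pvLoopB rest row2 (rows ++ [row2])

def draw_triangle_alt (height : Int) : String :=
  PySem.Str.join "\n" (pvLoopB (PySem.List.pyRange 1 (height + 1) 1) "" []).2

-- ===== PRECONDITION & SPEC =====
def Spec_draw_triangle (height : Int) (out : String) : Prop := out = draw_triangle_alt height
instance (height : Int) (out : String) : Decidable (Spec_draw_triangle height out) := by unfold Spec_draw_triangle; infer_instance

-- ===== CLAIM (what is proved, stated in full; the proofs are below) =====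
def Claim_equal_draw_triangle : Prop := ∀ (height : Int), Dom_draw_triangle height → Spec_draw_triangle height (draw_triangle height)

-- ===== LEMMAS AND PROOFS =====

-- the full row for index i: digits of 1..i as one string
def pvSeg (a i : Int) : String :=
  PySem.Str.join "" ((PySem.List.pyRange a (i + 1) 1).map PySem.Int.toStr)

-- join "" is flatten
theorem pv_join_nil_sep : ∀ (parts : List (List Char)),
    PySem.Chars.join [] parts = parts.flatten
  | [] => PySem.Chars.join_nil []
  | [p] => by simp [PySem.Chars.join_singleton]
  | p :: q :: rest => by
      rw [PySem.Chars.join_cons_cons, pv_join_nil_sep (q :: rest)]; simp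

theorem pv_string_toList_inj {s t : String} (h : s.toList = t.toList) : s = t := by
  have := congrArg String.ofList h
  simpa using this

-- peel the first index off a segment
theorem pv_seg_cons (a i : Int) (h : a ≤ i) :
    pvSeg a i = (PySem.Int.toStr a) ++ pvSeg (a + 1) i := by
  apply pv_string_toList_inj
  have hc : PySem.List.pyRange a (i + 1) 1 = a :: PySem.List.pyRange (a + 1) (i + 1) 1 :=
    PySem.List.pyRange_one_cons (by omega)
  simp [pvSeg, PySem.Str.toList_join, hc, pv_join_nil_sep]

theorem pv_seg_self (a : Int) : pvSeg a a = PySem.Int.toStr a := by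
  apply pv_string_toList_inj
  simp [pvSeg, PySem.List.pyRange_one_singleton, PySem.Str.toList_join, pv_join_nil_sep]

-- invariant of B's loop: the snapshots collected over a..height extend 'row' by the segments a..i
theorem pv_loopB_rows (height : Int) (a : Int) (row : String) (rows : List String) :
    (pvLoopB (PySem.List.pyRange a (height + 1) 1) row rows).2
    = rows ++ (PySem.List.pyRange a (height + 1) 1).map (fun i => row ++ pvSeg a i) := by
  by_cases hlt : a < height + 1
  · rw [PySem.List.pyRange_one_cons hlt]
    have ih := pv_loopB_rows height (a + 1) (row ++ PySem.Int.toStr a)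
      (rows ++ [row ++ PySem.Int.toStr a])
    have hmap : (PySem.List.pyRange (a + 1) (height + 1) 1).map
          (fun i => (row ++ PySem.Int.toStr a) ++ pvSeg (a + 1) i)
        = (PySem.List.pyRange (a + 1) (height + 1) 1).map (fun i => row ++ pvSeg a i) := by
      apply List.map_congr_left
      intro i hi
      have hai : a + 1 ≤ i := (PySem.List.mem_pyRange_one.mp hi).1
      rw [pv_seg_cons a i (by omega), String.append_assoc]
    simp only [pvLoopB, ih, hmap, List.map_cons, pv_seg_self, List.append_assoc,
      List.singleton_append]
  · have hnil : PySem.List.pyRange a (height + 1) 1 = [] :=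
      PySem.List.pyRange_one_eq_nil (by omega)
    simp [hnil, pvLoopB]
termination_by (height + 1 - a).toNat
decreasing_by omega

-- loop invariant for A: starting the loop at a ≤ height with accumulator n yields n's text followed
-- by the "\n"-joined rows a..height
theorem pv_loopA_join (height : Int) (a : Int) (ha : a ≤ height) (n : List (Int ⊕ String)) :
    (((pvLoopA height (PySem.List.pyRange a (height + 1) 1) n).map pvElemStr).map String.toList).flatten
    = ((n.map pvElemStr).map String.toList).flatten ++
        PySem.Chars.join ['\n']
          (((PySem.List.pyRange a (height + 1) 1).map (fun i => pvSeg 1 i)).map String.toList) := by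
  have hlt : a < height + 1 := by omega
  rw [PySem.List.pyRange_one_cons hlt]
  by_cases hEq : a = height
  · subst hEq
    have : PySem.List.pyRange (a + 1) (a + 1) 1 = [] := PySem.List.pyRange_one_eq_nil (le_refl _)
    simp [pvLoopA, this, PySem.Chars.join_singleton, pvSeg, PySem.Str.toList_join,
      pv_join_nil_sep, pvElemStr, List.map_map, Function.comp_def]
  · have ha' : a + 1 ≤ height := by omega
    have ih := pv_loopA_join height (a + 1) ha' (n ++ (PySem.List.pyRange 1 (a + 1) 1).map Sum.inl ++ [Sum.inr "\n"])
    have hcons : PySem.List.pyRange (a + 1) (height + 1) 1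
        = (a + 1) :: PySem.List.pyRange (a + 1 + 1) (height + 1) 1 :=
      PySem.List.pyRange_one_cons (by omega)
    simp only [pvLoopA, if_neg hEq]
    rw [ih, hcons]
    simp only [List.map_cons]
    rw [PySem.Chars.join_cons_cons]
    simp [pvElemStr, pvSeg, PySem.Str.toList_join, pv_join_nil_sep, List.map_map,
      Function.comp_def]
termination_by (height + 1 - a).toNat
decreasing_by omega

-- ===== VERDICT (by name: the statement is the Claim_ definition above) =====
theorem draw_triangle_spec : Claim_equal_draw_triangle := by
  intro height _
  unfold Spec_draw_triangle draw_triangle draw_triangle_alt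
  rw [pv_loopB_rows height 1 "" []]
  apply pv_string_toList_inj
  have h0 : "".toList = ([] : List Char) := rfl
  have h1 : "\n".toList = ['\n'] := rfl
  rw [PySem.Str.toList_join, PySem.Str.toList_join, h0, h1, pv_join_nil_sep]
  have hrow : ∀ i : Int, "" ++ pvSeg 1 i = pvSeg 1 i := by
    intro i; apply pv_string_toList_inj; simp
  by_cases h : 1 ≤ height
  · have := pv_loopA_join height 1 h []
    simpa [hrow] using this
  · have hnil : PySem.List.pyRange 1 (height + 1) 1 = [] :=
      PySem.List.pyRange_one_eq_nil (by omega)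
    simp [hnil, pvLoopA, pvLoopB, PySem.Chars.join_nil]
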